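-- pv_equiv track=rewrite | github.com/You-NeverKnow/algorithmPractice | sort/trials.py | check_sort
-- ===== SOURCE A (Python) =====
-- def check_sort(some_list, my_sorted_list):
--     """
--     Checks whether the sorting algorithm correctly sorts a random list in
--     ascending order
--     """
--
--     for each_element in some_list:
--         if each_element not in my_sorted_list:
--             return False
--
--     for index in range(len(my_sorted_list) - 1):
--         if my_sorted_list[index] > my_sorted_list[index + 1]:
--             return False
--
--     return True
-- ===== SOURCE B (Python) =====
-- def check_sort(some_list, my_sorted_list):
--     """
--     Checks whether the sorting algorithm correctly sorts a random list in
--     ascending order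
--     """
--     members = set(my_sorted_list)
--     return all(e in members for e in some_list) and my_sorted_list == sorted(my_sorted_list)
-- ===== Notes on version B (the rewrite author's own statement) =====
-- stated objective: idiomatic
-- what changed: Replaces the explicit membership loop by a set plus all(), and the index-based adjacent-pair scan by comparing the list with its sorted copy.
import Mathlib
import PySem

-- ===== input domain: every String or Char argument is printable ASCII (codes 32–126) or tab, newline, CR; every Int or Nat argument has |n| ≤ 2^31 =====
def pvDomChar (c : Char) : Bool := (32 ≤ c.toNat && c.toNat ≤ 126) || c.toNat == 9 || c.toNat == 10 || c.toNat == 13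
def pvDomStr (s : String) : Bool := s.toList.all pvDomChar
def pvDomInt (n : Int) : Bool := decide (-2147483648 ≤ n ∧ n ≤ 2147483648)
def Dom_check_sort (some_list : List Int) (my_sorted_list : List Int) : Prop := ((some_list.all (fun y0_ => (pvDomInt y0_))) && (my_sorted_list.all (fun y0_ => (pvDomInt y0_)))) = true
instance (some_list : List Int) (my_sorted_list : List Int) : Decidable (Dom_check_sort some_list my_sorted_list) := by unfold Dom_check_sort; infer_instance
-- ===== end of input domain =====

-- B replaces A's explicit membership loop and index-based adjacent-pair scan by a
-- set-based all() check plus comparison with a sorted copy (idiomatic; not faster).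

-- ===== PORT A =====
-- first loop of A: 'for each_element in some_list: if each_element not in my_sorted_list: return False'
def csMemLoop (some_list : List Int) (my_sorted_list : List Int) : Bool :=
  match some_list with
  | [] => true
  | e :: rest => if !(my_sorted_list.contains e) then false else csMemLoop rest my_sorted_list

-- second loop of A: 'for index in range(len(my_sorted_list)-1): if my_sorted_list[index] > my_sorted_list[index+1]: return False'
def csPairLoop (my_sorted_list : List Int) (idxs : List Int) : Bool :=
  match idxs with
  | [] => true
  | i :: rest =>
      if PySem.List.pyGetD my_sorted_list i 0 > PySem.List.pyGetD my_sorted_list (i + 1) 0 then false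
      else csPairLoop my_sorted_list rest

def check_sort (some_list : List Int) (my_sorted_list : List Int) : Bool :=
  if csMemLoop some_list my_sorted_list then
    csPairLoop my_sorted_list (PySem.List.pyRange 0 ((my_sorted_list.length : Int) - 1) 1)
  else false

-- ===== PORT B =====
def check_sort_alt (some_list : List Int) (my_sorted_list : List Int) : Bool :=
  let members : PySem.Set Int := PySem.Set.ofList my_sorted_list
  some_list.all (fun e => members.contains e) &&
    decide (my_sorted_list = PySem.List.sorted my_sorted_list (fun x => x) false)

-- ===== PRECONDITION & SPEC =====
def Spec_check_sort (some_list : List Int) (my_sorted_list : List Int) (out : Bool) : Prop := out = check_sort_alt some_list my_sorted_list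
instance (some_list : List Int) (my_sorted_list : List Int) (out : Bool) : Decidable (Spec_check_sort some_list my_sorted_list out) := by unfold Spec_check_sort; infer_instance

-- ===== CLAIM (what is proved, stated in full; the proofs are below) =====
def Claim_equal_check_sort : Prop := ∀ (some_list : List Int) (my_sorted_list : List Int), Dom_check_sort some_list my_sorted_list → Spec_check_sort some_list my_sorted_list (check_sort some_list my_sorted_list)

-- ===== LEMMAS AND PROOFS =====

-- A's membership loop equals B's set-based all()
theorem csMemLoop_eq_all (s m : List Int) :
    csMemLoop s m = s.all (fun e => (PySem.Set.ofList m).contains e) := by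
  induction s with
  | nil => rfl
  | cons e rest ih =>
      simp only [csMemLoop, List.all_cons, ih]
      have hmem : (PySem.Set.ofList m).contains e = m.contains e := by
        simp [PySem.Set.mem_ofList]
      rw [hmem]
      cases m.contains e <;> simp

-- A's pair loop is an 'all' over the index list
theorem csPairLoop_eq_all (m idxs : List Int) :
    csPairLoop m idxs
      = idxs.all (fun i => decide (PySem.List.pyGetD m i 0 ≤ PySem.List.pyGetD m (i + 1) 0)) := by
  induction idxs with
  | nil => rfl
  | cons i rest ih =>
      simp only [csPairLoop, List.all_cons, ih]
      by_cases h : PySem.List.pyGetD m i 0 > PySem.List.pyGetD m (i + 1) 0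
      · simp [h, not_le.mpr h]
      · simp [h, not_lt.mp h]

-- sortedness characterisations
theorem pairLoop_true_iff (m : List Int) :
    csPairLoop m (PySem.List.pyRange 0 ((m.length : Int) - 1) 1) = true
      ↔ m.IsChain (· ≤ ·) := by
  rw [csPairLoop_eq_all, List.all_eq_true, List.isChain_iff_getElem]
  constructor
  · intro h i hi
    have hmem : (i : Int) ∈ PySem.List.pyRange 0 ((m.length : Int) - 1) 1 := by
      rw [PySem.List.mem_pyRange_one]; omega
    have := h _ hmem
    rw [decide_eq_true_iff] at this
    have h1 : PySem.List.pyGetD m (i : Int) 0 = m[((i : Int)).toNat] :=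
      PySem.List.pyGetD_eq_getElem m 0 (by omega) (by omega)
    have h2 : PySem.List.pyGetD m ((i : Int) + 1) 0 = m[(((i : Int)) + 1).toNat] :=
      PySem.List.pyGetD_eq_getElem m 0 (by omega) (by omega)
    rw [h1, h2] at this
    simpa using this
  · intro h i hmem
    rw [PySem.List.mem_pyRange_one] at hmem
    rw [decide_eq_true_iff]
    have h1 : PySem.List.pyGetD m i 0 = m[i.toNat] :=
      PySem.List.pyGetD_eq_getElem m 0 (by omega) (by omega)
    have h2 : PySem.List.pyGetD m (i + 1) 0 = m[(i + 1).toNat] :=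
      PySem.List.pyGetD_eq_getElem m 0 (by omega) (by omega)
    rw [h1, h2]
    have hx := h i.toNat (by omega)
    have : (i + 1).toNat = i.toNat + 1 := by omega
    simpa [this] using hx

theorem sorted_self_iff_chain (m : List Int) :
    m = PySem.List.sorted m (fun x => x) false ↔ m.IsChain (· ≤ ·) := by
  rw [List.isChain_iff_pairwise]
  constructor
  · intro h
    have := PySem.List.sorted_pairwise (xs := m) (key := fun x => x)
    rw [← h] at this
    exact this
  · intro h
    exact (PySem.List.sorted_eq_self_of_pairwise m (fun x => x) h).symm

-- ===== VERDICT (by name: the statement is the Claim_ definition above) =====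
theorem check_sort_spec : Claim_equal_check_sort := by
  intro s m _
  simp only [Spec_check_sort, check_sort, check_sort_alt]
  rw [csMemLoop_eq_all]
  by_cases hmem : s.all (fun e => (PySem.Set.ofList m).contains e)
  · simp only [hmem, if_true, Bool.true_and]
    by_cases hc : m.IsChain (· ≤ ·)
    · rw [(pairLoop_true_iff m).mpr hc, decide_eq_true ((sorted_self_iff_chain m).mpr hc)]
    · have h1 : csPairLoop m (PySem.List.pyRange 0 ((m.length : Int) - 1) 1) = false := by
        by_contra h
        exact hc ((pairLoop_true_iff m).mp (by revert h; cases csPairLoop m (PySem.List.pyRange 0 ((m.length : Int) - 1) 1) <;> simp))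
      rw [h1, decide_eq_false (fun h => hc ((sorted_self_iff_chain m).mp h))]
  · simp only [Bool.not_eq_true] at hmem
    rw [hmem]
    simp
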